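-- pv_equiv track=rewrite | github.com/PetarMarinov1991/Software-University | python_fundamentals/5_lists_advanced/more_exercise/5.tic_tac_toe.py | play_board_data
-- ===== SOURCE A (Python) =====
-- def get_col(arr, col):
--     return list(map(lambda x: x[col], arr))
--
-- def play_board_data(matrix):
--     first_diagonal = [matrix[i][i] for i in range(len(matrix))]
--     second_diagonal = [matrix[len(matrix) - 1 - i][i] for i in range(len(matrix))]
--     cols = [get_col(matrix, i) for i in range(len(matrix))]
--     rows = matrix
--
--     play_board = [first_diagonal, second_diagonal]
--
--     for c in cols:
--         play_board.append(c)
--     for r in rows: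
--         play_board.append(r)
--
--     return play_board
-- ===== SOURCE B (Python) =====
-- def play_board_data(matrix):
--     n = len(matrix)
--
--     def walk(rows, r):
--         # data for rows[r:]: (main-diagonal part, anti-diagonal collected top-down, columns)
--         if not rows:
--             return [], [], [[] for _ in range(n)]
--         md, ad, cols = walk(rows[1:], r + 1)
--         row = rows[0]
--         return ([row[r]] + md,
--                 [row[n - 1 - r]] + ad,
--                 [[row[j]] + c for j, c in enumerate(cols)])
--
--     md, ad, cols = walk(matrix, 0)
--     return [md, ad[::-1]] + cols + matrix
-- ===== Notes on version B (the rewrite author's own statement) =====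
-- stated objective: alternative
-- what changed: B traverses the matrix once by structural recursion, building the main diagonal, the anti-diagonal (collected top-down, then reversed) and all columns simultaneously by consing onto the suffix's result, instead of A's three separate index-comprehension passes (one whole-matrix scan per column) plus append loops.
import Mathlib
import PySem

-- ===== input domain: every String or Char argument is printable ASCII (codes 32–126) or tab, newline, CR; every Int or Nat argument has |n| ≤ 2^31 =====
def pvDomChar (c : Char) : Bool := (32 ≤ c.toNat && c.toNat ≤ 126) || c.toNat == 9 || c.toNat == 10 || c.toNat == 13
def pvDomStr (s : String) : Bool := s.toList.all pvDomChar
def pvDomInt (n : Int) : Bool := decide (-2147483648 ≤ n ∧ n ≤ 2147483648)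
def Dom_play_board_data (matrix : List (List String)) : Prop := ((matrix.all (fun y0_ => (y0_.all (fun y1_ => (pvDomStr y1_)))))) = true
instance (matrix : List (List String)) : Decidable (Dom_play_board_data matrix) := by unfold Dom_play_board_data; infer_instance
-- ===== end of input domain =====

-- B replaces A's three separate comprehension passes (and per-column whole-matrix scans)
-- by one structural recursion over the rows that builds both diagonals and all columns
-- at once by consing onto the suffix's result (alternative decomposition, same cost).
-- Return-value equivalence only: A's returned board aliases the argument's row objects,
-- which is not modelled here.

-- ===== PORT A =====
-- get_col(arr, col) = list(map(lambda x: x[col], arr)); x[col] via pyGetD (Pre_ keeps it in range)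
def pvGetCol (arr : List (List String)) (col : Int) : List String :=
  arr.map (fun x => PySem.List.pyGetD x col "")

def play_board_data (matrix : List (List String)) : List (List String) :=
  let n : Int := matrix.length
  let firstDiagonal := (PySem.List.pyRange 0 n).map
    (fun i => PySem.List.pyGetD (PySem.List.pyGetD matrix i []) i "")
  let secondDiagonal := (PySem.List.pyRange 0 n).map
    (fun i => PySem.List.pyGetD (PySem.List.pyGetD matrix (n - 1 - i) []) i "")
  let cols := (PySem.List.pyRange 0 n).map (fun i => pvGetCol matrix i)
  let rows := matrix
  let playBoard := [firstDiagonal, secondDiagonal]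
  let playBoard := cols.foldl (fun pb c => pb ++ [c]) playBoard
  let playBoard := rows.foldl (fun pb r => pb ++ [r]) playBoard
  playBoard

-- ===== PORT B =====
-- walk(rows, r): structural recursion consing this row's contributions onto the
-- suffix's (main diagonal, top-down anti-diagonal, columns); row[j] via pyGetD.
def pvWalk (n : Int) :
    List (List String) → Int →
      List String × List String × List (List String)
  | [], _ => ([], [], (PySem.List.pyRange 0 n).map (fun _ => ([] : List String)))
  | row :: rest, r =>
    let (md, ad, cols) := pvWalk n rest (r + 1)
    (PySem.List.pyGetD row r "" :: md,
     PySem.List.pyGetD row (n - 1 - r) "" :: ad,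
     (PySem.List.enumerate cols).map (fun jc => PySem.List.pyGetD row jc.1 "" :: jc.2))

def play_board_data_alt (matrix : List (List String)) : List (List String) :=
  let n : Int := matrix.length
  let w := pvWalk n matrix 0
  -- ad[::-1] is List.reverse (PySem.List.slice?_none_none_neg_one)
  [w.1, w.2.1.reverse] ++ w.2.2 ++ matrix

-- ===== PRECONDITION & SPEC =====
-- Pre_ excludes exactly the ragged matrices with a row shorter than the matrix's
-- height, on which Python A raises IndexError (in a diagonal or in get_col).
def Pre_play_board_data (matrix : List (List String)) : Prop :=
  ∀ row ∈ matrix, matrix.length ≤ row.length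
instance (matrix : List (List String)) : Decidable (Pre_play_board_data matrix) := by
  unfold Pre_play_board_data; infer_instance

def pvWitness_play_board_data : List (List String) :=
  [["x", "o", "x"], ["o", "x", "o"], ["o", "o", "x"]]

def Spec_play_board_data (matrix : List (List String)) (out : List (List String)) : Prop :=
  out = play_board_data_alt matrix
instance (matrix : List (List String)) (out : List (List String)) :
    Decidable (Spec_play_board_data matrix out) := by unfold Spec_play_board_data; infer_instance

-- ===== CLAIM (what is proved, stated in full; the proofs are below) =====
def Claim_equal_play_board_data : Prop :=
  ∀ (matrix : List (List String)), Dom_play_board_data matrix →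
    Pre_play_board_data matrix → Spec_play_board_data matrix (play_board_data matrix)

-- ===== LEMMAS AND PROOFS =====

-- The main-diagonal component of the walk: entry r+k of row k, in row order.
lemma pvWalk_md (n : Int) (rows : List (List String)) (r : Int) :
    (pvWalk n rows r).1
      = (PySem.List.enumerate rows r).map (fun p => PySem.List.pyGetD p.2 p.1 "") := by
  induction rows generalizing r with
  | nil => simp [pvWalk]
  | cons row rest ih => simp [pvWalk, PySem.List.enumerate_cons, ih]

-- The anti-diagonal component, collected top-down: entry n-1-(r+k) of row k.
lemma pvWalk_ad (n : Int) (rows : List (List String)) (r : Int) :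
    (pvWalk n rows r).2.1
      = (PySem.List.enumerate rows r).map (fun p => PySem.List.pyGetD p.2 (n - 1 - p.1) "") := by
  induction rows generalizing r with
  | nil => simp [pvWalk]
  | cons row rest ih => simp [pvWalk, PySem.List.enumerate_cons, ih]

-- One walk step on a column state indexed by range n conses row[j] onto column j.
lemma pvEnumStep (n : Int) (g : Int → List String) (row : List String) :
    (PySem.List.enumerate ((PySem.List.pyRange 0 n).map g)).map
        (fun jc => PySem.List.pyGetD row jc.1 "" :: jc.2)
      = (PySem.List.pyRange 0 n).map (fun j => PySem.List.pyGetD row j "" :: g j) := by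
  apply List.ext_getElem
  · simp [PySem.List.length_enumerate, PySem.List.length_pyRange_one]
  · intro k h1 h2
    have hk : k < (PySem.List.pyRange 0 n).length := by
      simpa [PySem.List.length_enumerate] using h1
    simp only [List.getElem_map, PySem.List.getElem_enumerate]
    simp [PySem.List.getElem_pyRange_one 0 n k (by simpa using hk)]

-- The columns component of the walk: column j is entry j of every row, in order.
lemma pvWalk_cols (n : Int) (rows : List (List String)) (r : Int) :
    (pvWalk n rows r).2.2
      = (PySem.List.pyRange 0 n).map
          (fun j => rows.map (fun row => PySem.List.pyGetD row j "")) := by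
  induction rows generalizing r with
  | nil => simp [pvWalk]
  | cons row rest ih => simp [pvWalk, ih, pvEnumStep]

-- Counting down: range(0, n) reversed is i ↦ n-1-i over range(0, n).
lemma pvRange_reverse (n : Int) :
    (PySem.List.pyRange 0 n).reverse
      = (PySem.List.pyRange 0 n).map (fun i => n - 1 - i) := by
  apply List.ext_getElem
  · simp
  · intro k h1 h2
    have hk : k < (n - 0).toNat := by
      simpa [PySem.List.length_pyRange_one] using h2
    rw [List.getElem_reverse]
    simp only [List.getElem_map]
    rw [PySem.List.getElem_pyRange_one 0 n _ (by simp [PySem.List.length_pyRange_one]; omega),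
        PySem.List.getElem_pyRange_one 0 n k (by simpa [PySem.List.length_pyRange_one] using hk)]
    simp [PySem.List.length_pyRange_one] at *
    omega

-- ===== VERDICT (by name: the statement is the Claim_ definition above) =====
theorem play_board_data_spec : Claim_equal_play_board_data := by
  intro matrix _ _
  unfold Spec_play_board_data play_board_data play_board_data_alt
  simp only [PySem.List.foldl_append_singleton]
  rw [pvWalk_md, pvWalk_ad, pvWalk_cols,
      PySem.List.enumerate_eq_map_pyRange matrix ([] : List String)]
  have hidx : ∀ i : Int, (matrix.length : Int) - 1 - ((matrix.length : Int) - 1 - i) = i := by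
    intro i; ring
  simp only [List.map_map, Function.comp_def, ← List.map_reverse, pvRange_reverse,
    List.map_map, hidx, pvGetCol, PySem.List.len]
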